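-- pv_equiv track=rewrite | github.com/chpy04/tasky | backend/app/connectors/slack.py | _consolidate_threads
-- ===== SOURCE A (Python) =====
-- def _consolidate_threads(items: list[dict]) -> list[dict]:
--     """Collapse multiple items from the same Slack thread into a single item.
--
--     Any item with `thread_ts` set belongs to a thread. When the same thread
--     is captured by multiple passes (search + channel history, or multiple
--     replies each emitted as separate items), we keep exactly one representative
--     per thread — preferring whichever item already has the full thread array
--     attached — so no thread appears more than once in the output.
--     """
--     standalone: list[dict] = []
--     thread_groups: dict[str, list[dict]] = {}
--
--     for item in items:
--         thread_ts = item.get("thread_ts")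
--         ch_id = item.get("channel_id", "")
--         if thread_ts and ch_id:
--             key = f"{ch_id}:{thread_ts}"
--             thread_groups.setdefault(key, []).append(item)
--         else:
--             standalone.append(item)
--
--     result = list(standalone)
--     for group in thread_groups.values():
--         # Prefer an item that already has the full thread array attached.
--         with_thread = [i for i in group if "thread" in i]
--         result.append(with_thread[0] if with_thread else group[0])
--
--     return result
-- ===== SOURCE B (Python) =====
-- def _consolidate_threads(items: list[dict]) -> list[dict]:
--     """Precompute each item's thread key once, emit the standalone items, then for
--     each distinct key in first-seen order rescan the keyed list to pick that
--     thread's representative (first item carrying 'thread', else the first item)."""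
--     def key_of(item):
--         ts = item.get("thread_ts")
--         ch = item.get("channel_id", "")
--         return f"{ch}:{ts}" if ts and ch else None
--
--     keyed = [(key_of(it), it) for it in items]
--     out = [it for k, it in keyed if k is None]
--     seen: list[str] = []
--     for k, _ in keyed:
--         if k is None or k in seen:
--             continue
--         seen.append(k)
--         group = [it for kk, it in keyed if kk == k]
--         out.append(next((it for it in group if "thread" in it), group[0]))
--     return out
-- ===== Notes on version B (the rewrite author's own statement) =====
-- stated objective: alternative
-- what changed: A folds items into a dict of full per-thread groups and then filters each group in a second pass; B precomputes each item's key once into a keyed list, emits standalone items by a comprehension, and for each first-seen key rescans the keyed list to build the group and picks its representative with next(), keeping no group dict at all.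
import Mathlib
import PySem

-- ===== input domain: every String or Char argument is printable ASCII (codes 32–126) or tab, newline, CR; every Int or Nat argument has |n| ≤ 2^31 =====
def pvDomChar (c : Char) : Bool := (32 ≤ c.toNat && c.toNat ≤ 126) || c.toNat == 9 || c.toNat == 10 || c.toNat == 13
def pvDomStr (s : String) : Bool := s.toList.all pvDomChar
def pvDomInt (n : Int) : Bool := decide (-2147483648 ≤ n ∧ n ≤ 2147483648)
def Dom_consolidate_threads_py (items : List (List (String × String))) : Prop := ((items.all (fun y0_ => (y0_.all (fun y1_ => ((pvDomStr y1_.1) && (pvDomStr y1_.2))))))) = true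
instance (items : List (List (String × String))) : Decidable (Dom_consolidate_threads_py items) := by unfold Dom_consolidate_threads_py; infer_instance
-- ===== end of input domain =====

-- B replaces A's dict-of-groups-then-filter two-phase pass by a keyed list built once,
-- a comprehension for the standalone items, and a per-first-seen-key rescan (objective: alternative).

-- ===== PORT A =====
-- items are Python dicts as association lists (lookup = first match);
-- `x.getD "" ≠ ""` is exactly Python's truthiness of the Optional-string `item.get(...)`.
def stepA (acc : List (List (String × String)) × PySem.Dict String (List (List (String × String))))
    (item : List (String × String)) :
    List (List (String × String)) × PySem.Dict String (List (List (String × String))) :=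
  let thread_ts := item.lookup "thread_ts"
  let ch_id := (item.lookup "channel_id").getD ""
  if thread_ts.getD "" ≠ "" && ch_id ≠ "" then
    let key := ch_id ++ ":" ++ thread_ts.getD ""
    -- thread_groups.setdefault(key, []).append(item)  ==  d[key] = d.get(key, []) + [item]
    (acc.1, acc.2.modify key [] (· ++ [item]))
  else
    (acc.1 ++ [item], acc.2)

def consolidate_threads_py (items : List (List (String × String))) : List (List (String × String)) :=
  let st := items.foldl stepA ([], PySem.Dict.empty)
  -- result = list(standalone); for group in thread_groups.values(): append winner
  st.2.values.foldl
    (fun result group =>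
      let with_thread := group.filter (fun i => (i.lookup "thread").isSome)
      result ++ [match with_thread with
                 | w :: _ => w
                 | [] => group.headD []])   -- group[0]; every group is nonempty
    st.1

-- ===== PORT B =====
-- key_of(item): the thread key, or None for a standalone item
def keyOf (item : List (String × String)) : Option String :=
  let thread_ts := item.lookup "thread_ts"
  let ch_id := (item.lookup "channel_id").getD ""
  if thread_ts.getD "" ≠ "" && ch_id ≠ "" then some (ch_id ++ ":" ++ thread_ts.getD "") else none

-- next((it for it in group if "thread" in it), group[0])
def repOf (group : List (List (String × String))) : List (String × String) :=
  match group.find? (fun i => (i.lookup "thread").isSome) with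
  | some w => w
  | none => group.headD []

-- body of B's for-loop over the keyed list; state = (seen, out)
def stepB (keyed : List (Option String × List (String × String)))
    (acc : List String × List (List (String × String)))
    (p : Option String × List (String × String)) :
    List String × List (List (String × String)) :=
  match p.1 with
  | none => acc
  | some k =>
    if k ∈ acc.1 then acc
    else
      let group := keyed.filterMap (fun q => if q.1 == some k then some q.2 else none)
      (acc.1 ++ [k], acc.2 ++ [repOf group])

def consolidate_threads_py_alt (items : List (List (String × String))) : List (List (String × String)) :=
  let keyed := items.map (fun it => (keyOf it, it))
  let out := (keyed.filter (fun q => q.1.isNone)).map Prod.snd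
  (keyed.foldl (stepB keyed) ([], out)).2

-- ===== PRECONDITION & SPEC =====
def Spec_consolidate_threads_py (items : List (List (String × String))) (out : List (List (String × String))) : Prop := out = consolidate_threads_py_alt items
instance (items : List (List (String × String))) (out : List (List (String × String))) : Decidable (Spec_consolidate_threads_py items out) := by unfold Spec_consolidate_threads_py; infer_instance

-- ===== CLAIM (what is proved, stated in full; the proofs are below) =====
def Claim_equal_consolidate_threads_py : Prop := ∀ (items : List (List (String × String))), Dom_consolidate_threads_py items → Spec_consolidate_threads_py items (consolidate_threads_py items)

-- ===== LEMMAS AND PROOFS =====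

-- the group of a key over a keyed list (B's inner comprehension)
def groupOf (keyed : List (Option String × List (String × String))) (k : String) :
    List (List (String × String)) :=
  keyed.filterMap (fun q => if q.1 == some k then some q.2 else none)

-- the distinct thread keys of a keyed list, first-seen order, given already-seen keys
def newKeys : List (Option String × List (String × String)) → List String → List String
  | [], _ => []
  | p :: t, seen =>
    match p.1 with
    | none => newKeys t seen
    | some k => if k ∈ seen then newKeys t seen else k :: newKeys t (seen ++ [k])

-- A's per-group winner (the lambda in A's second loop)
def pickA (g : List (List (String × String))) : List (String × String) :=
  match g.filter (fun i => (i.lookup "thread").isSome) with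
  | w :: _ => w
  | [] => g.headD []

lemma groupOf_cons_none (it : List (String × String)) (kd : List (Option String × List (String × String))) (k : String) :
    groupOf ((none, it) :: kd) k = groupOf kd k := by
  simp [groupOf]

lemma groupOf_cons_some (k' : String) (it : List (String × String)) (kd : List (Option String × List (String × String))) (k : String) :
    groupOf ((some k', it) :: kd) k = if k' = k then it :: groupOf kd k else groupOf kd k := by
  by_cases h : k' = k <;> simp [groupOf, h]

lemma not_mem_of_mem_newKeys : ∀ (l : List (Option String × List (String × String))) (seen : List String) (k : String),
    k ∈ newKeys l seen → k ∉ seen := by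
  intro l
  induction l with
  | nil => intro seen k h; simp [newKeys] at h
  | cons p t ih =>
    intro seen k h
    rcases p with ⟨ko, it⟩
    cases ko with
    | none => exact ih seen k h
    | some k' =>
      by_cases hk : k' ∈ seen
      · simp only [newKeys, hk, if_pos] at h
        exact ih seen k h
      · simp only [newKeys, hk, if_neg, not_false_iff] at h
        rcases List.mem_cons.1 h with rfl | h
        · exact hk
        · intro hs
          exact ih (seen ++ [k']) k h (List.mem_append_left _ hs)

lemma pickA_eq_repOf (g : List (List (String × String))) : pickA g = repOf g := by
  unfold pickA repOf
  induction g with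
  | nil => simp
  | cons a t ih =>
    by_cases ha : (a.lookup "thread").isSome = true
    · simp [ha]
    · simp only [List.filter_cons, List.find?_cons, ha, Bool.false_eq_true, if_false]
      rw [show (a :: t).headD [] = a from rfl]
      cases hf : t.find? (fun i => (i.lookup "thread").isSome) with
      | some w =>
        have : t.filter (fun i => (i.lookup "thread").isSome) ≠ [] := by
          intro hnil
          have := List.find?_eq_none.2 (fun x hx => by
            have : x ∉ t.filter (fun i => (i.lookup "thread").isSome) := by simp [hnil]
            intro hp; exact this (List.mem_filter.2 ⟨hx, hp⟩))
          simp [this] at hf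
        cases hfl : t.filter (fun i => (i.lookup "thread").isSome) with
        | nil => exact absurd hfl this
        | cons w' t' =>
          rw [hfl] at ih; rw [hf] at ih
          simpa using ih
      | none =>
        have : t.filter (fun i => (i.lookup "thread").isSome) = [] := by
          apply List.filter_eq_nil_iff.2
          intro x hx
          have := List.find?_eq_none.1 hf x hx
          simpa using this
        simp [this]

-- B's loop: appends exactly one representative per not-yet-seen key, in first-seen order
lemma loopB (K : List (Option String × List (String × String))) :
    ∀ (l : List (Option String × List (String × String))) (seen : List String)
      (out : List (List (String × String))),
    l.foldl (stepB K) (seen, out)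
      = (seen ++ newKeys l seen, out ++ (newKeys l seen).map (fun k => repOf (groupOf K k))) := by
  intro l
  induction l with
  | nil => intro seen out; simp [newKeys]
  | cons p t ih =>
    intro seen out
    rcases p with ⟨ko, it⟩
    cases ko with
    | none => simp [List.foldl_cons, stepB, newKeys, ih]
    | some k =>
      by_cases hk : k ∈ seen
      · simp [List.foldl_cons, stepB, newKeys, hk, ih]
      · simp only [List.foldl_cons, stepB, newKeys, hk, if_neg, not_false_iff]
        rw [ih]
        simp [groupOf, List.append_assoc]

-- A's loop: full characterisation of the state after any item list, from any start
lemma loopA : ∀ (rest : List (List (String × String)))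
    (s : List (List (String × String)))
    (g : PySem.Dict String (List (List (String × String)))),
    g.keys.Nodup →
    (rest.foldl stepA (s, g)).1
      = s ++ ((rest.map (fun it => (keyOf it, it))).filter (fun q => q.1.isNone)).map Prod.snd ∧
    (rest.foldl stepA (s, g)).2.items
      = g.items.map (fun p => (p.1, p.2 ++ groupOf (rest.map (fun it => (keyOf it, it))) p.1))
        ++ (newKeys (rest.map (fun it => (keyOf it, it))) g.keys).map
             (fun k => (k, groupOf (rest.map (fun it => (keyOf it, it))) k)) := by
  intro rest
  induction rest with
  | nil =>
    intro s g hnd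
    simp [newKeys, groupOf]
  | cons it t ih =>
    intro s g hnd
    simp only [List.map_cons, List.foldl_cons]
    by_cases hc : ((decide ((it.lookup "thread_ts").getD "" ≠ "")) && (decide ((it.lookup "channel_id").getD "" ≠ ""))) = true
    · -- thread item
      set key := (it.lookup "channel_id").getD "" ++ ":" ++ (it.lookup "thread_ts").getD "" with hkey
      have hstep : stepA (s, g) it = (s, g.insert key (g.getD key [] ++ [it])) := by
        simp only [stepA, hc, if_pos]; rfl
      have hkeyOf : keyOf it = some key := by
        simp only [keyOf, hc, if_pos]; rfl
      rw [hstep, hkeyOf]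
      by_cases hk : g.contains key = true
      · -- existing key
        obtain ⟨grp, hg⟩ : ∃ grp, g.get? key = some grp := by
          have hcc := PySem.Dict.contains_eq_isSome_get? g key
          rw [hk] at hcc
          cases hgg : g.get? key with
          | none => rw [hgg] at hcc; simp at hcc
          | some v => exact ⟨v, rfl⟩
        have hgd : g.getD key [] = grp := PySem.Dict.getD_of_get?_eq_some g [] hg
        have hval : ∀ p ∈ g.items, p.1 = key → p.2 = grp := by
          intro p hp hpk
          have hq : g.get? p.1 = some p.2 := PySem.Dict.get?_of_mem_items g (by simpa using hp) hnd
          rw [hpk, hg] at hq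
          exact (Option.some.inj hq).symm
        have hkeys' : (g.insert key (g.getD key [] ++ [it])).keys = g.keys :=
          PySem.Dict.keys_insert_of_contains g _ hk
        have hnd' : (g.insert key (g.getD key [] ++ [it])).keys.Nodup := hkeys' ▸ hnd
        obtain ⟨ih1, ih2⟩ := ih s (g.insert key (g.getD key [] ++ [it])) hnd'
        have hmemk : key ∈ g.keys := by
          have := PySem.Dict.contains_eq_decide_mem_keys g key
          rw [hk] at this; exact of_decide_eq_true this.symm
        have hnk : newKeys ((some key, it) :: t.map (fun it => (keyOf it, it))) g.keys
            = newKeys (t.map (fun it => (keyOf it, it))) g.keys := by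
          simp [newKeys, hmemk]
        constructor
        · rw [ih1]; simp
        · rw [ih2, hnk, hkeys',
            PySem.Dict.items_insert_of_contains g (g.getD key [] ++ [it]) hk, hgd]
          rw [List.map_map]
          congr 1
          · apply List.map_congr_left
            intro p hp
            by_cases hpk : p.1 = key
            · have hpg := hval p hp hpk
              simp [Function.comp, hpk, hpg, groupOf_cons_some, List.append_assoc]
            · simp [Function.comp, beq_iff_eq, hpk, groupOf_cons_some, Ne.symm hpk]
          · apply List.map_congr_left
            intro k hkm
            have : k ∉ g.keys := not_mem_of_mem_newKeys _ _ _ hkm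
            have hne : key ≠ k := fun h => this (h ▸ hmemk)
            simp [groupOf_cons_some, hne]
      · -- fresh key
        have hk' : g.contains key = false := by simpa using hk
        have hgd : g.getD key [] = [] := PySem.Dict.getD_of_not_contains g [] hk'
        have hkeys' : (g.insert key (g.getD key [] ++ [it])).keys = g.keys ++ [key] := by
          rw [hgd]; exact PySem.Dict.keys_insert_of_not_contains g ([] ++ [it]) hk'
        have hnd' : (g.insert key (g.getD key [] ++ [it])).keys.Nodup :=
          PySem.Dict.nodup_keys_insert g key _ hnd
        obtain ⟨ih1, ih2⟩ := ih s (g.insert key (g.getD key [] ++ [it])) hnd'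
        have hmemk : key ∉ g.keys := by
          have := PySem.Dict.contains_eq_decide_mem_keys g key
          rw [hk'] at this
          exact of_decide_eq_false this.symm
        have hnk : newKeys ((some key, it) :: t.map (fun it => (keyOf it, it))) g.keys
            = key :: newKeys (t.map (fun it => (keyOf it, it))) (g.keys ++ [key]) := by
          simp [newKeys, hmemk]
        constructor
        · rw [ih1]; simp
        · rw [ih2, hnk, hkeys',
            PySem.Dict.items_insert_of_not_contains g (g.getD key [] ++ [it]) hk', hgd]
          rw [List.map_append, List.map_cons, List.append_assoc]
          congr 1
          · apply List.map_congr_left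
            intro p hp
            have hpk : p.1 ≠ key := fun h =>
              hmemk (h ▸ PySem.Dict.mem_keys_of_mem_items g hp)
            simp [groupOf_cons_some, Ne.symm hpk]
          · simp only [List.map_cons, List.nil_append, List.cons_append]
            congr 1
            · simp [groupOf_cons_some]
            · apply List.map_congr_left
              intro k hkm
              have : k ∉ g.keys ++ [key] := not_mem_of_mem_newKeys _ _ _ hkm
              have hne : key ≠ k := fun h => this (List.mem_append_right _ (by simp [h]))
              simp [groupOf_cons_some, hne]
    · -- standalone item
      have hstep : stepA (s, g) it = (s ++ [it], g) := by
        simp only [stepA, hc]; rfl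
      have hkeyOf : keyOf it = none := by
        simp only [keyOf]; rw [if_neg hc]
      rw [hstep, hkeyOf]
      obtain ⟨ih1, ih2⟩ := ih (s ++ [it]) g hnd
      constructor
      · rw [ih1]; simp [List.append_assoc]
      · rw [ih2]; simp [groupOf_cons_none, newKeys]

-- ===== VERDICT (by name: the statement is the Claim_ definition above) =====
theorem consolidate_threads_py_spec : Claim_equal_consolidate_threads_py := by
  intro items _
  unfold Spec_consolidate_threads_py consolidate_threads_py consolidate_threads_py_alt
  obtain ⟨h1, h2⟩ := loopA items [] PySem.Dict.empty PySem.Dict.nodup_keys_empty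
  have hA :
      (items.foldl stepA ([], PySem.Dict.empty)).2.values.foldl
        (fun result group =>
          let with_thread := group.filter (fun i => (i.lookup "thread").isSome)
          result ++ [match with_thread with
                     | w :: _ => w
                     | [] => group.headD []])
        (items.foldl stepA ([], PySem.Dict.empty)).1
      = (items.foldl stepA ([], PySem.Dict.empty)).1
        ++ (items.foldl stepA ([], PySem.Dict.empty)).2.values.map pickA :=
    PySem.List.foldl_append_singleton_eq_map pickA _ _
  rw [hA]
  simp only [loopB]
  rw [h1]
  have hvals : (items.foldl stepA ([], PySem.Dict.empty)).2.values
      = (newKeys (items.map (fun it => (keyOf it, it))) []).map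
          (groupOf (items.map (fun it => (keyOf it, it)))) := by
    simp only [PySem.Dict.values, h2]
    simp [PySem.Dict.empty, PySem.Dict.keys, List.map_map, Function.comp]
  rw [hvals, List.map_map]
  simp only [List.nil_append]
  congr 1
  apply List.map_congr_left
  intro k _
  simp [Function.comp, pickA_eq_repOf]
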